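-- pv_equiv track=rewrite | github.com/saifpatel9/DropMe | locustfile.py | _parse_credential_list
-- ===== SOURCE A (Python) =====
-- from typing import List, Optional, Tuple
--
-- def _parse_credential_list(raw: str) -> List[Tuple[str, str]]:
--     """
--     Parse credentials in the form: email1:pass1,email2:pass2
--     """
--     creds: List[Tuple[str, str]] = []
--     for part in (raw or "").split(","):
--         part = part.strip()
--         if not part or ":" not in part:
--             continue
--         email, password = part.split(":", 1)
--         email = email.strip()
--         password = password.strip()
--         if email and password:
--             creds.append((email, password))
--     return creds
-- ===== SOURCE B (Python) =====
-- from typing import List, Optional, Tuple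
--
-- def _parse_credential_list(raw: str) -> List[Tuple[str, str]]:
--     """One-pass character scanner: no split/strip passes over the input."""
--     creds: List[Tuple[str, str]] = []
--     email: List[str] = []
--     pw: Optional[List[str]] = None
--     for ch in (raw or "") + ",":
--         if ch == ",":
--             if pw is not None:
--                 e = "".join(email).strip()
--                 p = "".join(pw).strip()
--                 if e and p:
--                     creds.append((e, p))
--             email = []
--             pw = None
--         elif ch == ":" and pw is None:
--             pw = []
--         elif pw is None:
--             email.append(ch)
--         else:
--             pw.append(ch)
--     return creds
-- ===== Notes on version B (the rewrite author's own statement) =====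
-- stated objective: alternative
-- what changed: Replaced the multi-pass parse (split on the separator, strip each part, test for the delimiter, split the part once more) by a single-pass character state machine that accumulates the two fields and flushes a credential at each separator.
import Mathlib
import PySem

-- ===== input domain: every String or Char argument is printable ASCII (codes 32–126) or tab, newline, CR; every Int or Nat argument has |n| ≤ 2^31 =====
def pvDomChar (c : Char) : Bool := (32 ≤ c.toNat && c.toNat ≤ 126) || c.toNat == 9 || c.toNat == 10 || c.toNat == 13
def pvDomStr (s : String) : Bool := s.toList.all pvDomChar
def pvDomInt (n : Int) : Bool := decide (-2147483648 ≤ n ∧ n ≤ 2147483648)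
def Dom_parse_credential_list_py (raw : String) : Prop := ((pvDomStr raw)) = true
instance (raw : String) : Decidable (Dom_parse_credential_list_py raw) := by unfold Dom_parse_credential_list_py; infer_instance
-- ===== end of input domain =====

-- B replaces A's multi-pass split/strip parsing by a single-pass character state
-- machine (same results; a different algorithm, not claimed faster).

-- ===== PORT A =====
-- loop body of A's `for part in (raw or "").split(",")` loop
def pvBodyA (creds : List (String × String)) (part : String) : List (String × String) :=
  let part := PySem.Str.strip part
  if part = "" ∨ PySem.Str.isIn ":" part = false then creds
  else
    match PySem.Str.splitMax? part ":" 1 with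
    | some [email, password] =>
        let email := PySem.Str.strip email
        let password := PySem.Str.strip password
        if email ≠ "" ∧ password ≠ "" then creds ++ [(email, password)] else creds
    | _ => creds  -- unreachable: split(":", 1) with ":" in part yields exactly two pieces

def parse_credential_list_py (raw : String) : List (String × String) :=
  ((PySem.Str.split? raw ",").getD []).foldl pvBodyA []

-- ===== PORT B =====
-- state: (creds, email chars so far, none = no colon seen yet | some password chars)
def pvStepB (st : List (String × String) × List Char × Option (List Char)) (ch : Char) :
    List (String × String) × List Char × Option (List Char) :=
  if ch = ',' then
    (match st.2.2 with
     | some p =>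
        let e := PySem.Chars.strip st.2.1
        let q := PySem.Chars.strip p
        if e ≠ [] ∧ q ≠ [] then st.1 ++ [(String.ofList e, String.ofList q)] else st.1
     | none => st.1, [], none)
  else if ch = ':' ∧ st.2.2 = none then (st.1, st.2.1, some [])
  else
    match st.2.2 with
    | none => (st.1, st.2.1 ++ [ch], none)
    | some p => (st.1, st.2.1, some (p ++ [ch]))

def parse_credential_list_py_alt (raw : String) : List (String × String) :=
  ((raw.toList ++ [',']).foldl pvStepB ([], [], none)).1

-- ===== PRECONDITION & SPEC =====
def Spec_parse_credential_list_py (raw : String) (out : List (String × String)) : Prop := out = parse_credential_list_py_alt raw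
instance (raw : String) (out : List (String × String)) : Decidable (Spec_parse_credential_list_py raw out) := by unfold Spec_parse_credential_list_py; infer_instance

-- ===== CLAIM (what is proved, stated in full; the proofs are below) =====
def Claim_equal_parse_credential_list_py : Prop := ∀ (raw : String), Dom_parse_credential_list_py raw → Spec_parse_credential_list_py raw (parse_credential_list_py raw)

-- ===== LEMMAS AND PROOFS =====

-- split a char list at the first ':' (none = no colon)
def pvSplitC : List Char → List Char × Option (List Char)
  | [] => ([], none)
  | c :: rest =>
    if c = ':' then ([], some rest)
    else ((c :: (pvSplitC rest).1), (pvSplitC rest).2)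

-- the comma-separated segments of a char list (Python's s.split(","))
def pvSeg : List Char → List (List Char)
  | [] => [[]]
  | c :: rest =>
    if c = ',' then [] :: pvSeg rest
    else
      match pvSeg rest with
      | [] => [[c]]
      | h :: t => (c :: h) :: t

def pvFlushC (e p : List Char) : List (String × String) :=
  if PySem.Chars.strip e ≠ [] ∧ PySem.Chars.strip p ≠ [] then
    [(String.ofList (PySem.Chars.strip e), String.ofList (PySem.Chars.strip p))]
  else []

-- what one comma-segment contributes
def pvProc (part : List Char) : List (String × String) :=
  match pvSplitC part with
  | (_, none) => []
  | (a, some b) => pvFlushC a b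

def pvFlushOut (email : List Char) : Option (List Char) → List (String × String)
  | none => []
  | some p => pvFlushC email p

def pvPartsOut : List Char → Option (List Char) → List Char → List (String × String)
  | email, pw, [] => pvFlushOut email pw
  | email, pw, c :: rest =>
    if c = ',' then pvFlushOut email pw ++ pvPartsOut [] none rest
    else if c = ':' ∧ pw = none then pvPartsOut email (some []) rest
    else
      match pw with
      | none => pvPartsOut (email ++ [c]) none rest
      | some p => pvPartsOut email (some (p ++ [c])) rest

def pvFirst (email : List Char) (pw : Option (List Char)) (h : List Char) : List (String × String) :=
  match pw with
  | none => pvProc (email ++ h)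
  | some p => pvFlushC email (p ++ h)

theorem pvSeg_ne_nil (cs : List Char) : pvSeg cs ≠ [] := by
  cases cs with
  | nil => simp [pvSeg]
  | cons c rest =>
    simp only [pvSeg]
    split <;> [simp; skip]
    split <;> simp

theorem pvSplitC_char (p a : List Char) (o : Option (List Char)) (h : pvSplitC p = (a, o)) :
    (o = none → p = a ∧ ':' ∉ a) ∧ (∀ b, o = some b → p = a ++ ':' :: b ∧ ':' ∉ a) := by
  induction p generalizing a o with
  | nil => simp [pvSplitC] at h; obtain ⟨rfl, rfl⟩ := h; simp
  | cons c rest ih =>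
    by_cases hc : c = ':'
    · subst hc; simp [pvSplitC] at h; obtain ⟨rfl, rfl⟩ := h; simp
    · simp [pvSplitC, hc] at h
      obtain ⟨rfl, rfl⟩ := h
      have := ih (pvSplitC rest).1 (pvSplitC rest).2 rfl
      constructor
      · intro ho; rcases this.1 ho with ⟨h1, h2⟩
        exact ⟨by rw [← h1], by simp [h2, Ne.symm hc]⟩
      · intro b hb; rcases this.2 b hb with ⟨h1, h2⟩
        exact ⟨by rw [List.cons_append, ← h1], by simp [h2, Ne.symm hc]⟩

theorem pvSplitC_of_no_colon (p : List Char) (h : ':' ∉ p) : pvSplitC p = (p, none) := by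
  induction p with
  | nil => rfl
  | cons c rest ih =>
    simp at h
    simp [pvSplitC, Ne.symm h.1, ih h.2]

theorem pvSplitC_append (a b : List Char) (h : ':' ∉ a) :
    pvSplitC (a ++ ':' :: b) = (a, some b) := by
  induction a with
  | nil => simp [pvSplitC]
  | cons c rest ih =>
    simp at h
    simp [pvSplitC, Ne.symm h.1, ih h.2]

theorem pvSplitC_mem (p : List Char) (h : ':' ∈ p) :
    ∃ a b, pvSplitC p = (a, some b) := by
  rcases he : pvSplitC p with ⟨a, o⟩
  cases o with
  | some b => exact ⟨a, b, rfl⟩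
  | none =>
    rcases (pvSplitC_char p a none he).1 rfl with ⟨rfl, hn⟩
    exact absurd h hn

-- ---- strip lemmas ----

theorem pvMem_lstrip (p : List Char) (c : Char) (hc : PySem.Chars.isspace c = false) :
    c ∈ PySem.Chars.lstrip p ↔ c ∈ p := by
  unfold PySem.Chars.lstrip
  constructor
  · exact fun h => (List.dropWhile_sublist _).mem h
  · intro h
    induction p with
    | nil => simp at h
    | cons d rest ih =>
      by_cases hd : PySem.Chars.isspace d
      · simp [hd]
        rcases List.mem_cons.mp h with rfl | h'
        · simp [hc] at hd
        · exact ih h'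
      · simpa [hd] using h

theorem pvMem_rstrip (p : List Char) (c : Char) (hc : PySem.Chars.isspace c = false) :
    c ∈ PySem.Chars.rstrip p ↔ c ∈ p := by
  unfold PySem.Chars.rstrip
  rw [List.mem_reverse]
  rw [show (List.dropWhile PySem.Chars.isspace p.reverse) = PySem.Chars.lstrip p.reverse from rfl]
  rw [pvMem_lstrip _ _ hc, List.mem_reverse]

theorem pvMem_strip (p : List Char) (c : Char) (hc : PySem.Chars.isspace c = false) :
    c ∈ PySem.Chars.strip p ↔ c ∈ p := by
  unfold PySem.Chars.strip
  rw [pvMem_rstrip _ _ hc, pvMem_lstrip _ _ hc]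

theorem pvLstrip_append_colon (a b : List Char) :
    PySem.Chars.lstrip (a ++ ':' :: b) = PySem.Chars.lstrip a ++ ':' :: b := by
  unfold PySem.Chars.lstrip
  rw [List.dropWhile_append]
  split
  · next h =>
    rw [List.isEmpty_iff] at h
    rw [h]
    simp [show PySem.Chars.isspace ':' = false from rfl]
  · rfl

theorem pvRstrip_append_colon (a b : List Char) :
    PySem.Chars.rstrip (a ++ ':' :: b) = a ++ ':' :: PySem.Chars.rstrip b := by
  unfold PySem.Chars.rstrip
  rw [show (a ++ ':' :: b).reverse = b.reverse ++ ':' :: a.reverse by simp]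
  rw [List.dropWhile_append]
  split
  · next h =>
    rw [List.isEmpty_iff] at h
    rw [h]
    simp [show PySem.Chars.isspace ':' = false from rfl]
  · simp

theorem pvLstrip_idem (p : List Char) :
    PySem.Chars.lstrip (PySem.Chars.lstrip p) = PySem.Chars.lstrip p := by
  unfold PySem.Chars.lstrip
  exact List.dropWhile_idempotent _ _

theorem pvRstrip_idem (p : List Char) :
    PySem.Chars.rstrip (PySem.Chars.rstrip p) = PySem.Chars.rstrip p := by
  unfold PySem.Chars.rstrip
  simp [List.dropWhile_idempotent]

theorem pvRstrip_cons (c : Char) (rest : List Char) :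
    PySem.Chars.rstrip (c :: rest) =
      if PySem.Chars.rstrip rest = [] then (if PySem.Chars.isspace c then [] else [c])
      else c :: PySem.Chars.rstrip rest := by
  unfold PySem.Chars.rstrip
  rw [show (c :: rest).reverse = rest.reverse ++ [c] by simp]
  rw [List.dropWhile_append]
  split
  · next h =>
    rw [List.isEmpty_iff] at h
    have h' : (List.dropWhile PySem.Chars.isspace rest.reverse).reverse = [] := by simp [h]
    rw [if_pos h']
    by_cases hs : PySem.Chars.isspace c <;> simp [hs]
  · next h =>
    rw [List.isEmpty_iff] at h
    have h' : (List.dropWhile PySem.Chars.isspace rest.reverse).reverse ≠ [] := by simpa using h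
    rw [if_neg h']
    simp

theorem pvLstrip_cons (c : Char) (l : List Char) : PySem.Chars.lstrip (c :: l) =
    if PySem.Chars.isspace c then PySem.Chars.lstrip l else c :: l := by
  unfold PySem.Chars.lstrip
  rw [List.dropWhile_cons]

theorem pvStrip_comm (p : List Char) :
    PySem.Chars.lstrip (PySem.Chars.rstrip p) = PySem.Chars.rstrip (PySem.Chars.lstrip p) := by
  induction p with
  | nil => rfl
  | cons c rest ih =>
    by_cases hs : PySem.Chars.isspace c
    · by_cases h : PySem.Chars.rstrip rest = []
      · simp [pvRstrip_cons, pvLstrip_cons, hs, h, ← ih]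
      · simp [pvRstrip_cons, pvLstrip_cons, hs, h, ih]
    · by_cases h : PySem.Chars.rstrip rest = []
      · simp [pvRstrip_cons, pvLstrip_cons, hs, h]
      · simp [pvRstrip_cons, pvLstrip_cons, hs, h]

theorem pvStrip_lstrip (p : List Char) :
    PySem.Chars.strip (PySem.Chars.lstrip p) = PySem.Chars.strip p := by
  unfold PySem.Chars.strip
  rw [pvLstrip_idem]

theorem pvStrip_rstrip (p : List Char) :
    PySem.Chars.strip (PySem.Chars.rstrip p) = PySem.Chars.strip p := by
  unfold PySem.Chars.strip
  rw [pvStrip_comm, pvRstrip_idem]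

-- splitting the stripped part at its first colon gives fields with the same strip
theorem pvStrip_split (p a b : List Char) (h : pvSplitC p = (a, some b)) :
    pvSplitC (PySem.Chars.strip p) = (PySem.Chars.lstrip a, some (PySem.Chars.rstrip b)) ∧
    PySem.Chars.strip (PySem.Chars.lstrip a) = PySem.Chars.strip a ∧
    PySem.Chars.strip (PySem.Chars.rstrip b) = PySem.Chars.strip b := by
  rcases (pvSplitC_char p a (some b) h).2 b rfl with ⟨rfl, hna⟩
  have hstrip : PySem.Chars.strip (a ++ ':' :: b) =
      PySem.Chars.lstrip a ++ ':' :: PySem.Chars.rstrip b := by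
    unfold PySem.Chars.strip
    rw [pvLstrip_append_colon, pvRstrip_append_colon]
  have hna' : ':' ∉ PySem.Chars.lstrip a := by
    intro hm
    exact hna ((List.dropWhile_sublist _).mem hm)
  exact ⟨by rw [hstrip]; exact pvSplitC_append _ _ hna', pvStrip_lstrip a, pvStrip_rstrip b⟩

-- ---- A-side: the fold body equals pvProc on the segment's characters ----

theorem pvSingleton_infix (c : Char) (l : List Char) : [c] <:+: l ↔ c ∈ l := by
  constructor
  · intro ⟨u, v, h⟩; rw [← h]; simp
  · intro h
    rcases List.append_of_mem h with ⟨u, v, rfl⟩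
    exact ⟨u, v, by simp⟩

theorem pvIsIn_colon (p : List Char) : PySem.Chars.isIn [':'] p = true ↔ ':' ∈ p := by
  rw [PySem.Chars.isIn_iff_infix, pvSingleton_infix]

theorem pvOfList_eq_empty (l : List Char) : String.ofList l = "" ↔ l = [] := by
  constructor
  · intro h; have := congrArg String.toList h; simpa using this
  · intro h; simp [h]

-- splitOnMax with maxsplit = 0 returns the rest as one piece
theorem pvGoM0 (fuel : Nat) (l cur : List Char) (acc : List (List Char)) :
    PySem.Chars.splitOnMax.go [':'] fuel 0 l cur acc = acc.reverse ++ [cur.reverse ++ l] := by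
  rw [PySem.Chars.splitOnMax.go.eq_def]
  match fuel, l with
  | 0, l => simp
  | fuel+1, [] => simp
  | fuel+1, c :: rest => simp

-- splitOnMax.go with maxsplit = 1 splits at the first colon
theorem pvGoM1 (fuel : Nat) (l cur : List Char) (acc : List (List Char)) (hf : l.length ≤ fuel) :
    PySem.Chars.splitOnMax.go [':'] fuel 1 l cur acc =
      acc.reverse ++ (match pvSplitC l with
        | (a, none) => [cur.reverse ++ a]
        | (a, some b) => [cur.reverse ++ a, b]) := by
  induction fuel generalizing l cur acc with
  | zero =>
    have : l = [] := by cases l <;> simp_all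
    subst this
    rw [PySem.Chars.splitOnMax.go.eq_def]
    simp [pvSplitC]
  | succ fuel ih =>
    cases l with
    | nil => rw [PySem.Chars.splitOnMax.go.eq_def]; simp [pvSplitC]
    | cons c rest =>
      rw [PySem.Chars.splitOnMax.go.eq_def]
      simp only [Nat.succ_ne_zero, if_false]
      by_cases hc : c = ':'
      · subst hc
        have hpre : [':'].isPrefixOf (':' :: rest) = true := by simp [List.isPrefixOf]
        simp only [hpre, if_true]
        rw [show List.drop [':'].length (':' :: rest) = rest from rfl]
        rw [show (1 : Nat) - 1 = 0 from rfl, pvGoM0]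
        simp [pvSplitC]
      · have hpre : [':'].isPrefixOf (c :: rest) = false := by
          simp [List.isPrefixOf]; exact fun h => absurd h.symm hc
        simp only [hpre, Bool.false_eq_true, if_false]
        rw [ih rest (c :: cur) acc (by simpa using Nat.le_of_succ_le_succ hf)]
        simp only [pvSplitC, if_neg hc]
        rcases pvSplitC rest with ⟨a, o⟩
        cases o <;> simp

theorem pvSplitOnMax_colon (p : List Char) :
    PySem.Chars.splitOnMax p [':'] 1 =
      (match pvSplitC p with
        | (a, none) => [a]
        | (a, some b) => [a, b]) := by
  unfold PySem.Chars.splitOnMax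
  rw [if_neg (by norm_num)]
  rw [show ((1 : Int).toNat) = 1 from rfl]
  rw [pvGoM1 (p.length + 1) p [] [] (by omega)]
  rcases pvSplitC p with ⟨a, o⟩
  cases o <;> simp

theorem pvBodyA_eq (creds : List (String × String)) (s : String) :
    pvBodyA creds s = creds ++ pvProc s.toList := by
  unfold pvBodyA pvProc
  by_cases hmem : ':' ∈ s.toList
  · -- colon present: the guard is false and A splits at the first colon
    have hmem' : ':' ∈ PySem.Chars.strip s.toList := (pvMem_strip _ _ rfl).2 hmem
    have hne : PySem.Str.strip s ≠ "" := by
      intro h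
      rw [show PySem.Str.strip s = String.ofList (PySem.Chars.strip s.toList) from rfl,
        pvOfList_eq_empty] at h
      simp [h] at hmem'
    have hin : PySem.Str.isIn ":" (PySem.Str.strip s) = true := by
      rw [PySem.Str.isIn_eq]
      rw [show (":" : String).toList = [':'] from rfl]
      rw [show (PySem.Str.strip s).toList = PySem.Chars.strip s.toList from
        PySem.Str.toList_strip s]
      exact (pvIsIn_colon _).2 hmem'
    rw [if_neg (by
      rintro (h | h)
      · exact hne h
      · rw [hin] at h
        simp at h)]
    rcases pvSplitC_mem s.toList hmem with ⟨a, b, hsp⟩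
    rcases pvStrip_split s.toList a b hsp with ⟨hsp', hsa, hsb⟩
    have hsplit : PySem.Str.splitMax? (PySem.Str.strip s) ":" 1 =
        some [String.ofList (PySem.Chars.lstrip a), String.ofList (PySem.Chars.rstrip b)] := by
      unfold PySem.Str.splitMax? PySem.Chars.splitMax?
      rw [show (":" : String).toList = [':'] from rfl]
      rw [if_neg (by simp)]
      rw [show (PySem.Str.strip s).toList = PySem.Chars.strip s.toList from
        PySem.Str.toList_strip s]
      rw [pvSplitOnMax_colon, hsp']
      rfl
    rw [hsplit, hsp]
    unfold pvFlushC
    have e1 : PySem.Str.strip (String.ofList (PySem.Chars.lstrip a)) =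
        String.ofList (PySem.Chars.strip a) := by
      unfold PySem.Str.strip
      rw [show (String.ofList (PySem.Chars.lstrip a)).toList = PySem.Chars.lstrip a by simp, hsa]
    have e2 : PySem.Str.strip (String.ofList (PySem.Chars.rstrip b)) =
        String.ofList (PySem.Chars.strip b) := by
      unfold PySem.Str.strip
      rw [show (String.ofList (PySem.Chars.rstrip b)).toList = PySem.Chars.rstrip b by simp, hsb]
    simp only [e1, e2]
    by_cases hc : PySem.Chars.strip a ≠ [] ∧ PySem.Chars.strip b ≠ []
    · rw [if_pos (by
        constructor
        · rw [Ne, pvOfList_eq_empty]; exact hc.1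
        · rw [Ne, pvOfList_eq_empty]; exact hc.2), if_pos hc]
    · rw [if_neg (by
        intro ⟨h1, h2⟩
        rw [Ne, pvOfList_eq_empty] at h1 h2
        exact hc ⟨h1, h2⟩), if_neg hc]
      simp
  · -- no colon: A skips (":" not in stripped part), pvProc gives []
    have hmem' : ':' ∉ PySem.Chars.strip s.toList := fun h => hmem ((pvMem_strip _ _ rfl).1 h)
    have hin : PySem.Str.isIn ":" (PySem.Str.strip s) = false := by
      rw [PySem.Str.isIn_eq]
      rw [show (":" : String).toList = [':'] from rfl]
      rw [show (PySem.Str.strip s).toList = PySem.Chars.strip s.toList from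
        PySem.Str.toList_strip s]
      rw [← Bool.not_eq_true]
      intro h
      exact hmem' ((pvIsIn_colon _).1 h)
    rw [if_pos (Or.inr hin), pvSplitC_of_no_colon _ hmem]
    simp

-- ---- A equals flatMap pvProc over the comma segments ----

theorem pvGoSeg (fuel : Nat) (l cur : List Char) (acc : List (List Char)) (hf : l.length ≤ fuel) :
    PySem.Chars.splitOn.go [','] fuel l cur acc =
      acc.reverse ++ (match pvSeg l with
        | [] => []
        | h :: t => (cur.reverse ++ h) :: t) := by
  induction fuel generalizing l cur acc with
  | zero =>
    have : l = [] := by cases l <;> simp_all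
    subst this
    rw [PySem.Chars.splitOn.go.eq_def]
    simp [pvSeg]
  | succ fuel ih =>
    cases l with
    | nil => rw [PySem.Chars.splitOn.go.eq_def]; simp [pvSeg]
    | cons c rest =>
      rw [PySem.Chars.splitOn.go.eq_def]
      by_cases hc : c = ','
      · subst hc
        have hpre : [','].isPrefixOf (',' :: rest) = true := by simp [List.isPrefixOf]
        simp only [hpre, if_true]
        rw [show List.drop [','].length (',' :: rest) = rest from rfl]
        rw [ih rest [] (cur.reverse :: acc) (by simpa using Nat.le_of_succ_le_succ hf)]
        rcases he : pvSeg rest with _ | ⟨h, t⟩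
        · exact absurd he (pvSeg_ne_nil rest)
        · simp [pvSeg, he]
      · have hpre : [','].isPrefixOf (c :: rest) = false := by
          simp [List.isPrefixOf]; exact fun h => absurd h.symm hc
        simp only [hpre, Bool.false_eq_true, if_false]
        rw [ih rest (c :: cur) acc (by simpa using Nat.le_of_succ_le_succ hf)]
        rcases he : pvSeg rest with _ | ⟨h, t⟩
        · exact absurd he (pvSeg_ne_nil rest)
        · simp [pvSeg, he, hc]

theorem pvSplitOn_comma (cs : List Char) : PySem.Chars.splitOn cs [','] = pvSeg cs := by
  unfold PySem.Chars.splitOn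
  rw [pvGoSeg (cs.length + 1) cs [] [] (by omega)]
  rcases he : pvSeg cs with _ | ⟨h, t⟩
  · exact absurd he (pvSeg_ne_nil cs)
  · simp

theorem pvA_eq (raw : String) :
    parse_credential_list_py raw = (pvSeg raw.toList).flatMap pvProc := by
  unfold parse_credential_list_py
  rw [show PySem.Str.split? raw "," =
      some ((PySem.Chars.splitOn raw.toList [',']).map String.ofList) by
    unfold PySem.Str.split? PySem.Chars.split?
    rw [show ("," : String).toList = [','] from rfl]
    rw [if_neg (by simp)]
    rfl]
  rw [Option.getD_some, pvSplitOn_comma]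
  rw [show pvBodyA = fun creds s => creds ++ pvProc s.toList from
    funext fun creds => funext fun s => pvBodyA_eq creds s]
  rw [PySem.List.foldl_append_eq_flatMap]
  simp [List.flatMap_map]

-- ---- B equals flatMap pvProc over the comma segments ----

theorem pvStepB_comma (creds : List (String × String)) (email : List Char)
    (pw : Option (List Char)) :
    pvStepB (creds, email, pw) ',' = (creds ++ pvFlushOut email pw, [], none) := by
  unfold pvStepB pvFlushOut pvFlushC
  cases pw with
  | none => simp
  | some p =>
    simp only [reduceIte]
    split_ifs <;> simp_all

theorem pvStepB_colon (creds : List (String × String)) (email : List Char) :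
    pvStepB (creds, email, none) ':' = (creds, email, some []) := by
  unfold pvStepB
  rw [if_neg (by simp), if_pos (by simp)]

theorem pvStepB_none (creds : List (String × String)) (email : List Char) (ch : Char)
    (hc : ch ≠ ',') (hcol : ch ≠ ':') :
    pvStepB (creds, email, none) ch = (creds, email ++ [ch], none) := by
  unfold pvStepB
  rw [if_neg hc, if_neg (by simp [hcol])]

theorem pvStepB_some (creds : List (String × String)) (email p : List Char) (ch : Char)
    (hc : ch ≠ ',') :
    pvStepB (creds, email, some p) ch = (creds, email, some (p ++ [ch])) := by
  unfold pvStepB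
  rw [if_neg hc, if_neg (by simp)]

theorem pvPartsOut_nil (email : List Char) (pw : Option (List Char)) :
    pvPartsOut email pw [] = pvFlushOut email pw := rfl

theorem pvPartsOut_cons (email : List Char) (pw : Option (List Char)) (c : Char)
    (rest : List Char) :
    pvPartsOut email pw (c :: rest) =
      if c = ',' then pvFlushOut email pw ++ pvPartsOut [] none rest
      else if c = ':' ∧ pw = none then pvPartsOut email (some []) rest
      else
        match pw with
        | none => pvPartsOut (email ++ [c]) none rest
        | some p => pvPartsOut email (some (p ++ [c])) rest := rfl

theorem pvScan (cs : List Char) :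
    ∀ (creds : List (String × String)) (email : List Char) (pw : Option (List Char)),
    (List.foldl pvStepB (creds, email, pw) (cs ++ [','])).1 = creds ++ pvPartsOut email pw cs := by
  induction cs with
  | nil =>
    intro creds email pw
    rw [List.nil_append, List.foldl_cons, List.foldl_nil, pvStepB_comma, pvPartsOut_nil]
  | cons c rest ih =>
    intro creds email pw
    rw [List.cons_append, List.foldl_cons]
    by_cases hc : c = ','
    · subst hc
      rw [pvStepB_comma, ih, pvPartsOut_cons, if_pos rfl]
      simp
    · by_cases hcol : c = ':' ∧ pw = none
      · obtain ⟨rfl, rfl⟩ := hcol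
        rw [pvStepB_colon, ih, pvPartsOut_cons, if_neg hc, if_pos ⟨rfl, rfl⟩]
      · cases pw with
        | none =>
          have hcol' : c ≠ ':' := fun h => hcol ⟨h, rfl⟩
          rw [pvStepB_none _ _ _ hc hcol', ih, pvPartsOut_cons, if_neg hc,
            if_neg (by simp [hcol'])]
        | some p =>
          rw [pvStepB_some _ _ _ _ hc, ih, pvPartsOut_cons, if_neg hc, if_neg (by simp)]

theorem pvFirst_nil (email : List Char) (pw : Option (List Char)) (hne : ':' ∉ email) :
    pvFirst email pw [] = pvFlushOut email pw := by
  unfold pvFirst pvFlushOut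
  cases pw with
  | none => simp [pvProc, pvSplitC_of_no_colon email hne]
  | some p => simp

theorem pvPartsOut_eq (cs : List Char) :
    ∀ (email : List Char) (pw : Option (List Char)) (h : List Char) (t : List (List Char)),
    pvSeg cs = h :: t → ':' ∉ email →
    pvPartsOut email pw cs = pvFirst email pw h ++ t.flatMap pvProc := by
  induction cs with
  | nil =>
    intro email pw h t hseg hne
    simp [pvSeg] at hseg
    obtain ⟨rfl, rfl⟩ := hseg
    rw [show pvPartsOut email pw [] = pvFlushOut email pw from rfl, pvFirst_nil _ _ hne]
    simp
  | cons c rest ih =>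
    intro email pw h t hseg hne
    obtain ⟨h', t', hseg'⟩ : ∃ h' t', pvSeg rest = h' :: t' := by
      rcases he : pvSeg rest with _ | ⟨x, y⟩
      · exact absurd he (pvSeg_ne_nil rest)
      · exact ⟨x, y, rfl⟩
    by_cases hc : c = ','
    · subst hc
      rw [show pvSeg (',' :: rest) = [] :: pvSeg rest by simp [pvSeg]] at hseg
      injection hseg with h1 h2
      subst h1; subst h2
      rw [pvPartsOut_cons, if_pos rfl, ih [] none h' t' hseg' (by simp),
        pvFirst_nil _ _ hne, hseg']
      simp [pvFirst]
    · rw [show pvSeg (c :: rest) = (c :: h') :: t' by simp [pvSeg, hc, hseg']] at hseg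
      injection hseg with h1 h2
      subst h1; subst h2
      by_cases hcol : c = ':' ∧ pw = none
      · obtain ⟨rfl, rfl⟩ := hcol
        rw [pvPartsOut_cons, if_neg hc, if_pos ⟨rfl, rfl⟩,
          ih email (some []) h' t' hseg' hne]
        unfold pvFirst pvProc
        rw [pvSplitC_append email h' hne]
        simp
      · cases pw with
        | none =>
          have hcol' : c ≠ ':' := fun h => hcol ⟨h, rfl⟩
          rw [pvPartsOut_cons, if_neg hc, if_neg (by simp [hcol'])]
          rw [ih (email ++ [c]) none h' t' hseg' (by simp [hne, Ne.symm hcol'])]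
          unfold pvFirst
          simp
        | some p =>
          rw [pvPartsOut_cons, if_neg hc, if_neg (by simp)]
          have : (match some p with
              | none => pvPartsOut (email ++ [c]) none rest
              | some q => pvPartsOut email (some (q ++ [c])) rest) =
              pvPartsOut email (some (p ++ [c])) rest := rfl
          rw [this, ih email (some (p ++ [c])) h' t' hseg' hne]
          unfold pvFirst
          simp

theorem pvB_eq (raw : String) :
    parse_credential_list_py_alt raw = (pvSeg raw.toList).flatMap pvProc := by
  unfold parse_credential_list_py_alt
  rw [pvScan]
  obtain ⟨h', t', hseg⟩ : ∃ h' t', pvSeg raw.toList = h' :: t' := by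
    rcases he : pvSeg raw.toList with _ | ⟨x, y⟩
    · exact absurd he (pvSeg_ne_nil raw.toList)
    · exact ⟨x, y, rfl⟩
  rw [pvPartsOut_eq raw.toList [] none h' t' hseg (by simp), hseg]
  simp [pvFirst]

-- ===== VERDICT (by name: the statement is the Claim_ definition above) =====
theorem parse_credential_list_py_spec : Claim_equal_parse_credential_list_py := by
  intro raw _
  unfold Spec_parse_credential_list_py
  rw [pvA_eq, pvB_eq]
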